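-- pv_equiv track=rewrite | github.com/arturoornelasb/tibia-bonelord-469-cipher | archive/scripts/core_misc/garbled_segment_attack.py | find_anagram_matches
-- ===== SOURCE A (Python) =====
-- def find_anagram_matches(word, dict_words, max_diff=1):
--     """Find dictionary words that are anagrams or near-anagrams."""
--     word_sorted = sorted(word.lower())
--     matches = []
--     for dw in dict_words:
--         dw_sorted = sorted(dw.lower())
--         # Check if one is a sub-multiset of the other + up to max_diff extras
--         from collections import Counter as C
--         wc = C(word.lower())
--         dc = C(dw.lower())
--         # Symmetric difference
--         all_letters = set(wc.keys()) | set(dc.keys())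
--         diff = sum(abs(wc.get(l, 0) - dc.get(l, 0)) for l in all_letters)
--         if diff <= max_diff * 2 and len(dw) >= len(word) - max_diff:
--             matches.append((dw, diff // 2))
--     return matches
-- ===== SOURCE B (Python) =====
-- def find_anagram_matches(word, dict_words, max_diff=1):
--     """Find dictionary words that are anagrams or near-anagrams."""
--     ws = sorted(word.lower())
--     matches = []
--     for dw in dict_words:
--         ds = sorted(dw.lower())
--         i = j = 0
--         diff = 0
--         while i < len(ws) and j < len(ds):
--             if ws[i] == ds[j]:
--                 i += 1
--                 j += 1
--             elif ws[i] < ds[j]: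
--                 i += 1
--                 diff += 1
--             else:
--                 j += 1
--                 diff += 1
--         diff += (len(ws) - i) + (len(ds) - j)
--         if diff <= max_diff * 2 and len(dw) >= len(word) - max_diff:
--             matches.append((dw, diff // 2))
--     return matches
-- ===== Notes on version B (the rewrite author's own statement) =====
-- stated objective: alternative
-- what changed: B sorts the lowered word once and each lowered dict word, then counts the multiset symmetric difference with a two-pointer merge over the two sorted character lists (no Counters, no key sets, no per-letter sums); correct because a sorted merge visits each unmatched character exactly once, so its mismatch count equals A's sum of absolute count differences.
import Mathlib
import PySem

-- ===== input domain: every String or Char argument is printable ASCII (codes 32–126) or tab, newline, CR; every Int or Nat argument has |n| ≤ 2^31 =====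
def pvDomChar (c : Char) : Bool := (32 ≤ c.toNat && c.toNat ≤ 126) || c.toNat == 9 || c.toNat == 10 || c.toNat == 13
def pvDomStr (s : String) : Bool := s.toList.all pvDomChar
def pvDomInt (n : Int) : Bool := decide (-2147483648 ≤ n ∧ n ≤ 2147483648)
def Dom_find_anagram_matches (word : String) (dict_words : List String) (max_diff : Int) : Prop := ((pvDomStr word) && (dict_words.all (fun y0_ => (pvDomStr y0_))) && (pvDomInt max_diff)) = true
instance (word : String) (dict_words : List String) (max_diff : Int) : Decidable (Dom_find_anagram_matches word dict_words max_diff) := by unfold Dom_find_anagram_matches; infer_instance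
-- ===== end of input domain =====

-- B replaces A's per-word Counter pair / key-set union / absolute-difference sum with a
-- two-pointer merge over the two sorted lowered character lists, counting unmatched
-- characters directly (objective: alternative; no Counters or key sets are built).


-- ===== PORT A =====
def find_anagram_matches (word : String) (dict_words : List String) (max_diff : Int) : List (String × Int) :=
  let _word_sorted := PySem.List.sorted ((PySem.Str.lower word).toList) (fun x => x) false
  dict_words.foldl (fun ms dw =>
    let _dw_sorted := PySem.List.sorted ((PySem.Str.lower dw).toList) (fun x => x) false
    let wc := PySem.Dict.counter ((PySem.Str.lower word).toList)
    let dc := PySem.Dict.counter ((PySem.Str.lower dw).toList)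
    let all_letters := PySem.Set.union (PySem.Set.ofList wc.keys) (PySem.Set.ofList dc.keys)
    let diff := (all_letters.map (fun l => |wc.getD l 0 - dc.getD l 0|)).sum
    if diff ≤ max_diff * 2 ∧ PySem.Str.len dw ≥ PySem.Str.len word - max_diff then
      ms ++ [(dw, PySem.Int.floordiv diff 2)]
    else ms) []

-- ===== PORT B =====
-- the `while i < len(ws) and j < len(ds)` loop of Source B, state (i, j, diff)
def pvMergeLoop (ws ds : List Char) (i j : Nat) (diff : Int) : Int × Nat × Nat :=
  if h : i < ws.length ∧ j < ds.length then
    let a := ws.getD i ' '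
    let b := ds.getD j ' '
    if a = b then pvMergeLoop ws ds (i+1) (j+1) diff
    else if a < b then pvMergeLoop ws ds (i+1) j (diff+1)
    else pvMergeLoop ws ds i (j+1) (diff+1)
  else (diff, i, j)
termination_by (ws.length - i) + (ds.length - j)
decreasing_by all_goals omega

def find_anagram_matches_alt (word : String) (dict_words : List String) (max_diff : Int) : List (String × Int) :=
  let ws := PySem.List.sorted ((PySem.Str.lower word).toList) (fun x => x) false
  dict_words.foldl (fun ms dw =>
    let ds := PySem.List.sorted ((PySem.Str.lower dw).toList) (fun x => x) false
    let r := pvMergeLoop ws ds 0 0 0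
    let diff := r.1 + ((ws.length : Int) - r.2.1) + ((ds.length : Int) - r.2.2)
    if diff ≤ max_diff * 2 ∧ PySem.Str.len dw ≥ PySem.Str.len word - max_diff then
      ms ++ [(dw, PySem.Int.floordiv diff 2)]
    else ms) []

-- ===== PRECONDITION & SPEC =====
def Spec_find_anagram_matches (word : String) (dict_words : List String) (max_diff : Int) (out : List (String × Int)) : Prop := out = find_anagram_matches_alt word dict_words max_diff
instance (word : String) (dict_words : List String) (max_diff : Int) (out : List (String × Int)) : Decidable (Spec_find_anagram_matches word dict_words max_diff out) := by unfold Spec_find_anagram_matches; infer_instance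

-- ===== CLAIM (what is proved, stated in full; the proofs are below) =====
def Claim_equal_find_anagram_matches : Prop := ∀ (word : String) (dict_words : List String) (max_diff : Int), Dom_find_anagram_matches word dict_words max_diff → Spec_find_anagram_matches word dict_words max_diff (find_anagram_matches word dict_words max_diff)

-- ===== LEMMAS AND PROOFS =====

-- the multiset symmetric-difference size of two character lists
def pvS (w d : List Char) : Int :=
  ∑ c ∈ w.toFinset ∪ d.toFinset, |(w.count c : Int) - d.count c|

theorem pvS_superset (w d : List Char) (s : Finset Char)
    (hs : w.toFinset ∪ d.toFinset ⊆ s) :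
    (∑ c ∈ s, |(w.count c : Int) - d.count c|) = pvS w d := by
  unfold pvS
  refine (Finset.sum_subset hs ?_).symm
  intro c _ hc
  have hw : w.count c = 0 := by
    rw [List.count_eq_zero]; intro h; exact hc (by simp [List.mem_toFinset, h])
  have hd : d.count c = 0 := by
    rw [List.count_eq_zero]; intro h; exact hc (by simp [List.mem_toFinset, h])
  simp [hw, hd]

theorem pv_sum_count_superset (W : List Char) (s : Finset Char) (hs : W.toFinset ⊆ s) :
    (∑ x ∈ s, (W.count x : Int)) = W.length := by
  rw [← Finset.sum_subset hs (by intro x _ hx; simp_all [List.count_eq_zero])]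
  push_cast [← List.sum_toFinset_count_eq_length W]
  rfl

theorem pvS_nil (d : List Char) : pvS [] d = d.length := by
  unfold pvS
  have : ∀ c ∈ (([] : List Char).toFinset ∪ d.toFinset),
      |(([] : List Char).count c : Int) - d.count c| = (d.count c : Int) := by
    intro c _; simp
  rw [Finset.sum_congr rfl this]
  simpa using pv_sum_count_superset d _ (by simp)

theorem pvS_nil_right (w : List Char) : pvS w [] = w.length := by
  unfold pvS
  have : ∀ c ∈ (w.toFinset ∪ ([] : List Char).toFinset),
      |(w.count c : Int) - ([] : List Char).count c| = (w.count c : Int) := by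
    intro c _; simp
  rw [Finset.sum_congr rfl this]
  simpa using pv_sum_count_superset w _ (by simp)

theorem pvS_cons_cons (a : Char) (w d : List Char) :
    pvS (a :: w) (a :: d) = pvS w d := by
  have hs : (a :: w).toFinset ∪ (a :: d).toFinset
      = insert a (w.toFinset ∪ d.toFinset) := by
    ext x; simp; try tauto
  unfold pvS
  rw [hs]
  have h1 : ∀ c ∈ insert a (w.toFinset ∪ d.toFinset),
      |((a :: w).count c : Int) - (a :: d).count c|
        = |(w.count c : Int) - d.count c| := by
    intro c _
    by_cases hc : c = a <;> simp [List.count_cons, hc]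
  rw [Finset.sum_congr rfl h1]
  exact pvS_superset w d _ (Finset.subset_insert _ _)

theorem pvS_cons_left (a : Char) (w d : List Char) (hd : d.count a = 0) :
    pvS (a :: w) d = 1 + pvS w d := by
  have hsub : (a :: w).toFinset ∪ d.toFinset
      = insert a (w.toFinset ∪ d.toFinset) := by
    ext x; simp
  have hR : (∑ c ∈ insert a (w.toFinset ∪ d.toFinset),
      |(w.count c : Int) - d.count c|) = pvS w d :=
    pvS_superset w d _ (Finset.subset_insert _ _)
  have hL : pvS (a :: w) d = ∑ c ∈ insert a (w.toFinset ∪ d.toFinset),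
      |((a :: w).count c : Int) - d.count c| := by
    unfold pvS; rw [hsub]
  rw [hL, ← hR]
  have hmem : a ∈ insert a (w.toFinset ∪ d.toFinset) := Finset.mem_insert_self _ _
  rw [← Finset.add_sum_erase _ (fun c => |(((a :: w).count c : Int)) - d.count c|) hmem,
      ← Finset.add_sum_erase _ (fun c => |((w.count c : Int)) - d.count c|) hmem]
  have h2 : ∀ c ∈ (insert a (w.toFinset ∪ d.toFinset)).erase a,
      |((a :: w).count c : Int) - d.count c| = |(w.count c : Int) - d.count c| := by
    intro c hc
    have hca : a ≠ c := fun h => (Finset.mem_erase.mp hc).1 h.symm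
    simp [hca]
  rw [Finset.sum_congr rfl h2]
  have h1 : |((a :: w).count a : Int) - d.count a| = |(w.count a : Int) - d.count a| + 1 := by
    rw [List.count_cons_self, hd]
    simp only [Nat.cast_zero, sub_zero, Nat.cast_add, Nat.cast_one]
    rw [abs_of_nonneg (by positivity), abs_of_nonneg (by positivity)]
  rw [h1]
  ring

theorem pvS_cons_right (b : Char) (w d : List Char) (hw : w.count b = 0) :
    pvS w (b :: d) = 1 + pvS w d := by
  have hsymm : ∀ x y : List Char, pvS x y = pvS y x := by
    intro x y; unfold pvS
    rw [Finset.union_comm]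
    refine Finset.sum_congr rfl ?_
    intro c _; rw [abs_sub_comm]
  rw [hsymm, pvS_cons_left b d w hw, hsymm]

theorem pvS_perm (w w' d d' : List Char) (h1 : w.Perm w') (h2 : d.Perm d') :
    pvS w d = pvS w' d' := by
  unfold pvS
  have hf1 : w.toFinset = w'.toFinset := by ext x; simp [h1.mem_iff]
  have hf2 : d.toFinset = d'.toFinset := by ext x; simp [h2.mem_iff]
  rw [hf1, hf2]
  refine Finset.sum_congr rfl ?_
  intro c _
  rw [h1.count_eq, h2.count_eq]

-- the merge loop computes the symmetric-difference size of the remaining suffixes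
theorem pvMergeLoop_spec (ws ds : List Char) :
    ∀ n i j diff, (ws.length - i) + (ds.length - j) ≤ n →
    i ≤ ws.length → j ≤ ds.length →
    (ws.drop i).Pairwise (· ≤ ·) → (ds.drop j).Pairwise (· ≤ ·) →
    (pvMergeLoop ws ds i j diff).1
      + ((ws.length : Int) - (pvMergeLoop ws ds i j diff).2.1)
      + ((ds.length : Int) - (pvMergeLoop ws ds i j diff).2.2)
      = diff + pvS (ws.drop i) (ds.drop j) := by
  intro n
  induction n with
  | zero =>
    intro i j diff hn hi hj _ _
    have hi' : i = ws.length := by omega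
    have hj' : j = ds.length := by omega
    rw [pvMergeLoop]
    simp [hi', hj', pvS_nil]
  | succ n ih =>
    intro i j diff hn hi hj hpw hpd
    by_cases h : i < ws.length ∧ j < ds.length
    · obtain ⟨hiw, hjd⟩ := h
      have hh : i < ws.length ∧ j < ds.length := ⟨hiw, hjd⟩
      have hwd : ws.drop i = ws[i] :: ws.drop (i + 1) := List.drop_eq_getElem_cons hiw
      have hdd : ds.drop j = ds[j] :: ds.drop (j + 1) := List.drop_eq_getElem_cons hjd
      have hga : ws.getD i ' ' = ws[i] := List.getD_eq_getElem ws ' ' hiw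
      have hgb : ds.getD j ' ' = ds[j] := List.getD_eq_getElem ds ' ' hjd
      have hpw' : (ws.drop (i + 1)).Pairwise (· ≤ ·) := by
        rw [hwd] at hpw; exact hpw.of_cons
      have hpd' : (ds.drop (j + 1)).Pairwise (· ≤ ·) := by
        rw [hdd] at hpd; exact hpd.of_cons
      by_cases heq : ws[i] = ds[j]
      · have hstep : pvMergeLoop ws ds i j diff = pvMergeLoop ws ds (i+1) (j+1) diff := by
          rw [pvMergeLoop]; simp only [dif_pos hh, hga, hgb, if_pos heq]
        rw [hstep, ih (i+1) (j+1) diff (by omega) (by omega) (by omega) hpw' hpd',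
          hwd, hdd, ← heq, pvS_cons_cons]
      · by_cases hlt : ws[i] < ds[j]
        · have hcount : (ds.drop j).count ws[i] = 0 := by
            rw [List.count_eq_zero, hdd]
            intro hmem
            rcases List.mem_cons.mp hmem with h1 | h1
            · exact heq h1
            · rw [hdd] at hpd
              exact absurd (List.rel_of_pairwise_cons hpd h1) (by
                intro hle; exact absurd (lt_of_lt_of_le hlt hle) (lt_irrefl _))
          have hstep : pvMergeLoop ws ds i j diff = pvMergeLoop ws ds (i+1) j (diff+1) := by
            rw [pvMergeLoop]; simp only [dif_pos hh, hga, hgb, if_neg heq, if_pos hlt]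
          rw [hstep, ih (i+1) j (diff+1) (by omega) (by omega) hj hpw' hpd, hwd,
            pvS_cons_left _ _ _ hcount]
          ring
        · have hgt : ds[j] < ws[i] := by
            rcases lt_trichotomy ws[i] ds[j] with h1 | h1 | h1
            · exact absurd h1 hlt
            · exact absurd h1 heq
            · exact h1
          have hcount : (ws.drop i).count ds[j] = 0 := by
            rw [List.count_eq_zero, hwd]
            intro hmem
            rcases List.mem_cons.mp hmem with h1 | h1
            · exact heq h1.symm
            · rw [hwd] at hpw
              exact absurd (List.rel_of_pairwise_cons hpw h1) (by
                intro hle; exact absurd (lt_of_lt_of_le hgt hle) (lt_irrefl _))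
          have hstep : pvMergeLoop ws ds i j diff = pvMergeLoop ws ds i (j+1) (diff+1) := by
            rw [pvMergeLoop]; simp only [dif_pos hh, hga, hgb, if_neg heq, if_neg hlt]
          rw [hstep, ih i (j+1) (diff+1) (by omega) hi (by omega) hpw hpd', hdd]
          rw [pvS_cons_right _ _ _ hcount]
          ring
    · have hstep : pvMergeLoop ws ds i j diff = (diff, i, j) := by
        rw [pvMergeLoop]; simp only [dif_neg h]
      rw [hstep]
      rcases (by omega : i = ws.length ∨ j = ds.length) with h1 | h1
      · have hde : ws.drop i = [] := by rw [h1]; simp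
        rw [hde, pvS_nil]
        have hlen : ((ds.drop j).length : Int) = (ds.length : Int) - j := by
          simp [List.length_drop]; omega
        rw [hlen, h1]; push_cast; ring
      · have hde : ds.drop j = [] := by rw [h1]; simp
        rw [hde, pvS_nil_right]
        have hlen : ((ws.drop i).length : Int) = (ws.length : Int) - i := by
          simp [List.length_drop]; omega
        rw [hlen, h1]; push_cast; ring

-- A's symmetric-difference sum equals pvS of the two lowered lists
theorem pv_diffA_eq (W D : List Char) :
    ((PySem.Set.union (PySem.Set.ofList ((PySem.Dict.counter W).keys))
        (PySem.Set.ofList ((PySem.Dict.counter D).keys))).map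
      (fun l => |(PySem.Dict.counter W).getD l 0 - (PySem.Dict.counter D).getD l 0|)).sum
    = pvS W D := by
  simp only [PySem.Dict.keys_counter, PySem.Set.ofList_ofList, PySem.Dict.getD_counter]
  have hU : (PySem.Set.union (PySem.Set.ofList W) (PySem.Set.ofList D)).Nodup :=
    PySem.Set.nodup_union _ _ (PySem.Set.nodup_ofList W)
  rw [← List.sum_toFinset _ hU]
  have hT : (PySem.Set.union (PySem.Set.ofList W) (PySem.Set.ofList D)).toFinset
      = W.toFinset ∪ D.toFinset := by
    ext x; simp [List.mem_toFinset, PySem.Set.mem_union, PySem.Set.mem_ofList]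
  rw [hT]; rfl

-- ===== VERDICT (by name: the statement is the Claim_ definition above) =====
theorem find_anagram_matches_spec : Claim_equal_find_anagram_matches := by
  intro word dict_words max_diff _
  unfold Spec_find_anagram_matches find_anagram_matches find_anagram_matches_alt
  dsimp only
  apply PySem.List.foldl_congr_mem
  intro acc dw _
  dsimp only
  have hdA := pv_diffA_eq ((PySem.Str.lower word).toList) ((PySem.Str.lower dw).toList)
  have hws := PySem.List.sorted_pairwise ((PySem.Str.lower word).toList) (fun x => x)
  have hds := PySem.List.sorted_pairwise ((PySem.Str.lower dw).toList) (fun x => x)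
  have hdB := pvMergeLoop_spec
      (PySem.List.sorted ((PySem.Str.lower word).toList) (fun x => x) false)
      (PySem.List.sorted ((PySem.Str.lower dw).toList) (fun x => x) false)
      ((PySem.List.sorted ((PySem.Str.lower word).toList) (fun x => x) false).length
        + (PySem.List.sorted ((PySem.Str.lower dw).toList) (fun x => x) false).length)
      0 0 0 (by omega) (by omega) (by omega) (by simpa using hws) (by simpa using hds)
  simp only [List.drop_zero] at hdB
  rw [zero_add] at hdB
  rw [hdA]
  rw [show pvS ((PySem.Str.lower word).toList) ((PySem.Str.lower dw).toList)
      = pvS (PySem.List.sorted ((PySem.Str.lower word).toList) (fun x => x) false)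
            (PySem.List.sorted ((PySem.Str.lower dw).toList) (fun x => x) false) from
    (pvS_perm _ _ _ _ (PySem.List.sorted_perm _ _ _) (PySem.List.sorted_perm _ _ _)).symm]
  rw [← hdB]
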